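-- pv_equiv track=rewrite | github.com/whharris917/phoenix | .ipynb_checkpoints/orchestrator-checkpoint.py | find_json_block
-- ===== SOURCE A (Python) =====
-- def find_json_block(text):
--
--     # First, try to find a markdown-style JSON block
--     start_marker = '```json'
--     end_marker = '```'
--     start_index = text.find(start_marker)
--
--     if start_index != -1:
--         end_index = text.find(end_marker, start_index + len(start_marker))
--         if end_index != -1:
--             # Extract the content between the markers
--             json_content_start = start_index + len(start_marker)
--             return json_content_start, end_index
--
--     # If markdown block is not found, fall back to brace counting from the end
--     end_brace_index = text.rfind('}')
--     if end_brace_index == -1: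
--         return None, None
--
--     brace_count = 1
--     start_brace_index = -1
--
--     for i in range(end_brace_index - 1, -1, -1):
--         if text[i] == '}': brace_count += 1
--         elif text[i] == '{': brace_count -= 1
--         if brace_count == 0:
--             start_brace_index = i
--             break
--
--     if start_brace_index == -1:
--         return None, None
--
--     return start_brace_index, end_brace_index + 1
-- ===== SOURCE B (Python) =====
-- def find_json_block(text):
--     # Markdown-style block first (unchanged from the original).
--     start_marker = '```json'
--     end_marker = '```'
--     start_index = text.find(start_marker)
--     if start_index != -1:
--         end_index = text.find(end_marker, start_index + len(start_marker))
--         if end_index != -1: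
--             json_content_start = start_index + len(start_marker)
--             return json_content_start, end_index
--
--     # One forward pass: a stack of indices of unmatched '{'; each '}' pops its
--     # match (or None). The state left by the LAST '}' decides the answer.
--     stack = []
--     match = None
--     end = None
--     for i, ch in enumerate(text):
--         if ch == '{':
--             stack.append(i)
--         elif ch == '}':
--             end = i
--             match = stack.pop() if stack else None
--
--     if end is None or match is None:
--         return None, None
--     return match, end + 1
-- ===== Notes on version B (the rewrite author's own statement) =====
-- stated objective: alternative
-- what changed: The backward brace-counting scan from the last '}' is replaced by a single forward pass that keeps a stack of indices of unmatched '{' and records, at every '}', its popped match; the match and position left by the last '}' give the answer.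
import Mathlib
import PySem

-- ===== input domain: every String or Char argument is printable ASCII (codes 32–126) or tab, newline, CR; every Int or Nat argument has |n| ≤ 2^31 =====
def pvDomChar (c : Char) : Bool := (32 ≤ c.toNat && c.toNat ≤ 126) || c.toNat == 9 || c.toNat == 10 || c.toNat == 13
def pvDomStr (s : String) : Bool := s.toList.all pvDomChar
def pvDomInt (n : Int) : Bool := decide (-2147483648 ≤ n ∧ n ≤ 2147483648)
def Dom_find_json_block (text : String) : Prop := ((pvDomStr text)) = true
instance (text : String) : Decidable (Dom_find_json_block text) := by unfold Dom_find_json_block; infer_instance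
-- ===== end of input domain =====

-- B replaces A's backward brace-counting scan by one forward pass with a stack of
-- indices of unmatched '{' (objective: alternative algorithm, same cost).

-- ===== PORT A =====
-- the backward loop 'for i in range(end_brace_index-1,-1,-1)': aLoopA cs n count
-- processes indices n-1, n-2, …, 0; returns start_brace_index (-1 if no break).
-- Indices visited are always in range, so cs.getD n ' ' is exactly text[i].
def aLoopA (cs : List Char) : Nat → Int → Int
  | 0, _ => -1
  | n+1, count =>
    let c := cs.getD n ' '
    let count' := if c = '}' then count + 1 else if c = '{' then count - 1 else count
    if count' = 0 then (n : Int) else aLoopA cs n count'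

-- fall-through part of A after the markdown branch
def aFallback (text : String) : Option Int × Option Int :=
  let end_brace_index := PySem.Str.rfind text "}"
  if end_brace_index = -1 then (none, none)
  else
    let start_brace_index := aLoopA text.toList end_brace_index.toNat 1
    if start_brace_index = -1 then (none, none)
    else (some start_brace_index, some (end_brace_index + 1))

def find_json_block (text : String) : Option Int × Option Int :=
  let start_index := PySem.Str.find text "```json"
  if start_index ≠ -1 then
    let end_index := PySem.Str.findFrom text "```" (start_index + 7) none
    if end_index ≠ -1 then (some (start_index + 7), some end_index)
    else aFallback text
  else aFallback text

-- ===== PORT B =====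
-- 'for i, ch in enumerate(text)': bLoop cs i stack m e; the Lean list head is the
-- Python stack's top (append = push at head, pop = head/tail).
def bLoop (cs : List Char) (i : Nat) (stack : List Int) (m e : Option Int) :
    List Int × Option Int × Option Int :=
  match cs with
  | [] => (stack, m, e)
  | c :: rest =>
    if c = '{' then bLoop rest (i+1) ((i : Int) :: stack) m e
    else if c = '}' then bLoop rest (i+1) stack.tail stack.head? (some (i : Int))
    else bLoop rest (i+1) stack m e

-- fall-through part of B after the markdown branch
def bFallback (text : String) : Option Int × Option Int :=
  let r := bLoop text.toList 0 [] none none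
  match r.2.2, r.2.1 with
  | some e, some m => (some m, some (e + 1))
  | _, _ => (none, none)

def find_json_block_alt (text : String) : Option Int × Option Int :=
  let start_index := PySem.Str.find text "```json"
  if start_index ≠ -1 then
    let end_index := PySem.Str.findFrom text "```" (start_index + 7) none
    if end_index ≠ -1 then (some (start_index + 7), some end_index)
    else bFallback text
  else bFallback text

-- ===== PRECONDITION & SPEC =====
def Spec_find_json_block (text : String) (out : Option Int × Option Int) : Prop := out = find_json_block_alt text
instance (text : String) (out : Option Int × Option Int) : Decidable (Spec_find_json_block text out) := by unfold Spec_find_json_block; infer_instance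

-- ===== CLAIM (what is proved, stated in full; the proofs are below) =====
def Claim_equal_find_json_block : Prop := ∀ (text : String), Dom_find_json_block text → Spec_find_json_block text (find_json_block text)

-- ===== LEMMAS AND PROOFS =====

-- stack of indices of unmatched '{' after reading the first n characters (head = top)
def stackOf (cs : List Char) : Nat → List Int
  | 0 => []
  | n+1 =>
    let s := stackOf cs n
    let c := cs.getD n ' '
    if c = '{' then (n : Int) :: s else if c = '}' then s.tail else s

-- index of the last '}' among the first n characters
def lastB (cs : List Char) : Nat → Option Nat
  | 0 => none
  | n+1 => if cs.getD n ' ' = '}' then some n else lastB cs n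

-- the match recorded by the most recent '}' among the first n characters
def matchOf (cs : List Char) : Nat → Option Int
  | 0 => none
  | n+1 => if cs.getD n ' ' = '}' then (stackOf cs n).head? else matchOf cs n

theorem stackOf_nonneg (cs : List Char) : ∀ n x, x ∈ stackOf cs n → 0 ≤ x := by
  intro n
  induction n with
  | zero => intro x hx; simp [stackOf] at hx
  | succ n ih =>
    intro x hx
    simp only [stackOf] at hx
    split_ifs at hx with h1 h2
    · rcases List.mem_cons.mp hx with h | h
      · omega
      · exact ih x h
    · exact ih x (List.mem_of_mem_tail hx)
    · exact ih x hx

theorem aLoopA_spec (cs : List Char) :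
    ∀ n (k : Int), 1 ≤ k →
      aLoopA cs n k = ((stackOf cs n)[(k - 1).toNat]?).getD (-1) := by
  intro n
  induction n with
  | zero => intro k hk; simp [aLoopA, stackOf]
  | succ n ih =>
    intro k hk
    simp only [aLoopA, stackOf]
    by_cases h1 : cs.getD n ' ' = '}'
    · simp only [h1, reduceIte, Char.reduceEq]
      have hne : ¬ (k + 1 = 0) := by omega
      rw [if_neg hne, ih (k+1) (by omega)]
      have h2 : (k + 1 - 1).toNat = (k - 1).toNat + 1 := by omega
      rw [h2, List.getElem?_tail]
    · by_cases h2 : cs.getD n ' ' = '{'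
      · simp only [h2, reduceIte, Char.reduceEq]
        by_cases hk1 : k = 1
        · subst hk1; norm_num
        · have hne : ¬ (k - 1 = 0) := by omega
          rw [if_neg hne, ih (k-1) (by omega)]
          have h3 : (k - 1).toNat = (k - 1 - 1).toNat + 1 := by omega
          rw [h3]
          simp
      · simp only [h1, h2, reduceIte]
        have hne : ¬ (k = 0) := by omega
        rw [if_neg hne, ih k hk]

theorem matchOf_spec (cs : List Char) :
    ∀ n, matchOf cs n = match lastB cs n with
      | none => none
      | some j => (stackOf cs j).head? := by
  intro n
  induction n with
  | zero => simp [matchOf, lastB]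
  | succ n ih =>
    simp only [matchOf, lastB]
    by_cases h : cs.getD n ' ' = '}'
    · rw [if_pos h, if_pos h]
    · rw [if_neg h, if_neg h, ih]

-- one-character prefix test = indexed character test (any index, any list)
theorem isPrefixOf_single (cs : List Char) (i : Nat) (c : Char) (hc : c ≠ ' ') :
    [c].isPrefixOf (cs.drop i) = true ↔ cs.getD i ' ' = c := by
  by_cases hi : i < cs.length
  · have hd : cs.drop i = cs[i] :: cs.drop (i+1) := List.drop_eq_getElem_cons hi
    have hg : cs.getD i ' ' = cs[i] := List.getD_eq_getElem _ _ hi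
    rw [hd, hg]
    simp [List.isPrefixOf]
    exact eq_comm
  · have h1 : cs.drop i = [] := List.drop_eq_nil_of_le (by omega)
    have hg : cs.getD i ' ' = ' ' := by
      simp [List.getD, List.getElem?_eq_none (by omega : cs.length ≤ i)]
    rw [h1, hg]
    simp [List.isPrefixOf]
    exact fun h => hc h.symm

theorem rfind_go_spec (cs : List Char) :
    ∀ n, PySem.Chars.rfind.go cs ['}'] n =
      match lastB cs (n+1) with
      | none => -1
      | some j => (j : Int) := by
  intro n
  induction n with
  | zero =>
    rw [PySem.Chars.rfind.go]
    by_cases h : cs.getD 0 ' ' = '}'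
    · rw [if_pos (by simpa using (isPrefixOf_single cs 0 '}' (by decide)).mpr h)]
      have hl : lastB cs (0+1) = some 0 := by simp only [lastB, if_pos h]
      rw [hl]
      simp
    · rw [if_neg (by simpa using fun hh => h ((isPrefixOf_single cs 0 '}' (by decide)).mp (by simpa using hh)))]
      have hl : lastB cs (0+1) = none := by simp only [lastB, if_neg h]
      rw [hl]
  | succ n ih =>
    rw [PySem.Chars.rfind.go]
    by_cases h : cs.getD (n+1) ' ' = '}'
    · rw [if_pos (by simpa using (isPrefixOf_single cs (n+1) '}' (by decide)).mpr h)]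
      have hl : lastB cs (n+1+1) = some (n+1) := by simp only [lastB, if_pos h]
      rw [hl]
    · rw [if_neg (by simpa using fun hh => h ((isPrefixOf_single cs (n+1) '}' (by decide)).mp (by simpa using hh))), ih]
      have hl : lastB cs (n+1+1) = lastB cs (n+1) := by simp only [lastB, if_neg h]
      rw [hl]

-- lastB only changes when the new character is within range (it is ' ' otherwise)
theorem lastB_length_succ (cs : List Char) : lastB cs (cs.length + 1) = lastB cs cs.length := by
  simp [lastB, List.getD]

theorem bLoop_spec (cs : List Char) :
    ∀ rest n, n ≤ cs.length → cs.drop n = rest →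
      bLoop rest n (stackOf cs n) (matchOf cs n) ((lastB cs n).map (fun j => (j : Int))) =
        (stackOf cs cs.length, matchOf cs cs.length,
          (lastB cs cs.length).map (fun j => (j : Int))) := by
  intro rest
  induction rest with
  | nil =>
    intro n hle hdrop
    have hlen : (cs.drop n).length = 0 := by rw [hdrop]; rfl
    rw [List.length_drop] at hlen
    have hn' : n = cs.length := by omega
    subst hn'
    simp [bLoop]
  | cons c rest ih =>
    intro n hle hdrop
    have hn : n < cs.length := by
      by_contra hge
      rw [List.drop_eq_nil_of_le (by omega)] at hdrop
      simp at hdrop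
    have hd : cs.drop n = cs[n] :: cs.drop (n+1) := List.drop_eq_getElem_cons hn
    rw [hd] at hdrop
    injection hdrop with hc hrest
    have hcn : cs.getD n ' ' = c := by rw [List.getD_eq_getElem _ _ hn, hc]
    rw [bLoop]
    by_cases h1 : c = '{'
    · rw [if_pos h1]
      have hne : ¬ (cs.getD n ' ' = '}') := by rw [hcn, h1]; decide
      have e1 : stackOf cs (n+1) = (n : Int) :: stackOf cs n := by
        simp only [stackOf, hcn, h1, reduceIte, Char.reduceEq]
      have e2 : matchOf cs (n+1) = matchOf cs n := by
        simp only [matchOf, if_neg hne]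
      have e3 : lastB cs (n+1) = lastB cs n := by
        simp only [lastB, if_neg hne]
      rw [← e1, ← e2, ← e3]
      exact ih (n+1) (by omega) hrest
    · rw [if_neg h1]
      by_cases h2 : c = '}'
      · rw [if_pos h2]
        have heq : cs.getD n ' ' = '}' := by rw [hcn, h2]
        have e1 : stackOf cs (n+1) = (stackOf cs n).tail := by
          simp only [stackOf, hcn, h2, reduceIte, Char.reduceEq]
        have e2 : matchOf cs (n+1) = (stackOf cs n).head? := by
          simp only [matchOf, if_pos heq]
        have e3 : lastB cs (n+1) = some n := by
          simp only [lastB, if_pos heq]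
        have e3' : (lastB cs (n+1)).map (fun j => (j : Int)) = some ((n : Nat) : Int) := by
          rw [e3]; rfl
        rw [← e1, ← e2, ← e3']
        exact ih (n+1) (by omega) hrest
      · rw [if_neg h2]
        have hne1 : ¬ (cs.getD n ' ' = '{') := by rw [hcn]; exact h1
        have hne2 : ¬ (cs.getD n ' ' = '}') := by rw [hcn]; exact h2
        have e1 : stackOf cs (n+1) = stackOf cs n := by
          simp only [stackOf, if_neg hne1, if_neg hne2]
        have e2 : matchOf cs (n+1) = matchOf cs n := by
          simp only [matchOf, if_neg hne2]
        have e3 : lastB cs (n+1) = lastB cs n := by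
          simp only [lastB, if_neg hne2]
        rw [← e1, ← e2, ← e3]
        exact ih (n+1) (by omega) hrest

theorem fallback_eq (text : String) : aFallback text = bFallback text := by
  classical
  set cs := text.toList with hcs
  have hrfind : PySem.Str.rfind text "}" =
      (match lastB cs cs.length with
        | none => -1
        | some j => (j : Int)) := by
    have h1 : PySem.Str.rfind text "}" = PySem.Chars.rfind cs ['}'] := by
      simp [PySem.Str.rfind, hcs]
    rw [h1, PySem.Chars.rfind, rfind_go_spec, lastB_length_succ]
  have hb : bLoop cs 0 [] none none =
      (stackOf cs cs.length, matchOf cs cs.length,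
        (lastB cs cs.length).map (fun j => (j : Int))) := by
    have := bLoop_spec cs cs 0 (by omega) (by simp)
    simpa [stackOf, matchOf, lastB] using this
  unfold aFallback bFallback
  rw [hb, hrfind]
  cases hl : lastB cs cs.length with
  | none =>
    simp [matchOf_spec, hl]
  | some j =>
    have hj0 : ¬ ((j : Int) = -1) := by omega
    rw [if_neg (by simpa using hj0)]
    have htn : ((j : Int)).toNat = j := Int.toNat_natCast j
    rw [htn]
    have hm : matchOf cs cs.length = (stackOf cs j).head? := by
      rw [matchOf_spec, hl]
    have ha := aLoopA_spec cs j 1 (by norm_num)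
    have hz : ((1 : Int) - 1).toNat = 0 := by norm_num
    rw [hz] at ha
    cases hh : (stackOf cs j).head? with
    | none =>
      have : (stackOf cs j)[0]? = none := by rw [← List.head?_eq_getElem?, hh]
      rw [ha, this]
      simp [hm, hh]
    | some v =>
      have hv : 0 ≤ v := stackOf_nonneg cs j v (List.mem_of_mem_head? (by rw [hh]; rfl))
      have : (stackOf cs j)[0]? = some v := by rw [← List.head?_eq_getElem?, hh]
      rw [ha, this]
      simp only [Option.getD_some]
      rw [if_neg (by omega)]
      simp [hm, hh]

-- ===== VERDICT (by name: the statement is the Claim_ definition above) =====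
theorem find_json_block_spec : Claim_equal_find_json_block := by
  intro text _
  unfold Spec_find_json_block find_json_block find_json_block_alt
  simp only [fallback_eq]
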